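-- pv_equiv track=rewrite | github.com/ldsec/every_byte_matters | inference_attack/lib/build_datasets.py | split_classic_ble
-- ===== SOURCE A (Python) =====
-- def split_classic_ble(sources_files, folder='data/'):
--     """
--     Sorts input csv into map[device][app][action]
--     """
--     sources_hierarchy = dict()
--
--     def is_ble(s):
--         fname = s.replace(folder, '')
--         parts = fname.split("_")
--         return parts[3].lower() == "ble"
--
--
--     for s in sources_files:
--         fname = s.replace(folder, '')
--         parts = fname.split("_")
--         device, app, action = parts[0], parts[1], parts[2]
--
--         if not device in sources_hierarchy:
--             sources_hierarchy[device] = dict()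
--         if not app in sources_hierarchy[device]:
--             sources_hierarchy[device][app] = dict()
--         if not action in sources_hierarchy[device][app]:
--             sources_hierarchy[device][app][action] = []
--
--         sources_hierarchy[device][app][action].append(s)
--
--     sources_classic = []
--     sources_ble = []
--
--     for device in sources_hierarchy:
--         for app in sources_hierarchy[device]:
--             for action in sources_hierarchy[device][app]:
--                 for s in sorted(sources_hierarchy[device][app][action]):
--                     if is_ble(s):
--                         sources_ble.append(s)
--                     else:
--                         sources_classic.append(s)
--
--     return sources_classic, sources_ble
-- ===== SOURCE B (Python) =====
-- def split_classic_ble(sources_files, folder='data/'):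
--     """Same grouping/ordering without nested dicts: ordered distinct keys via
--     dict.fromkeys plus list filters, then one final partition of the flat order."""
--     def parts(s):
--         return s.replace(folder, '').split("_")
--     ordered = []
--     for d in dict.fromkeys(parts(s)[0] for s in sources_files):
--         dfiles = [s for s in sources_files if parts(s)[0] == d]
--         for a in dict.fromkeys(parts(s)[1] for s in dfiles):
--             afiles = [s for s in dfiles if parts(s)[1] == a]
--             for t in dict.fromkeys(parts(s)[2] for s in afiles):
--                 ordered += sorted(s for s in afiles if parts(s)[2] == t)
--     classic = [s for s in ordered if parts(s)[3].lower() != "ble"]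
--     ble = [s for s in ordered if parts(s)[3].lower() == "ble"]
--     return classic, ble
-- ===== Notes on version B (the rewrite author's own statement) =====
-- stated objective: alternative
-- what changed: Replaces the nested dict-of-dict-of-dict build-then-traverse with a flat pipeline: ordered distinct keys per level via dict.fromkeys plus list filters produce the grouped order, and the classic/ble split becomes one final partition of that flat list.
import Mathlib
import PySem

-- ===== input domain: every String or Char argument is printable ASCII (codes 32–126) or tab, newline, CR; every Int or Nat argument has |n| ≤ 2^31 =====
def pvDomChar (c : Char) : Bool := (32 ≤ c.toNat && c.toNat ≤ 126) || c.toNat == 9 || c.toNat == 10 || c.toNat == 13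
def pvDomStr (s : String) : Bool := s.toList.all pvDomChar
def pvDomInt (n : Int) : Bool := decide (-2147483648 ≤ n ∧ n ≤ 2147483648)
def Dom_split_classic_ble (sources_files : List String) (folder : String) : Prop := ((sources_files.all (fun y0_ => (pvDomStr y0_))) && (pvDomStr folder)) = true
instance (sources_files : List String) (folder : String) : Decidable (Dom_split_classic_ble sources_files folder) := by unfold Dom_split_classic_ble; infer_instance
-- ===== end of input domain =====

-- B replaces A's nested dict-of-dict-of-dict build-then-traverse by ordered distinct
-- keys (dict.fromkeys) plus list filters and one final partition (objective: alternative).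

-- shared parsing helpers (both Pythons define the same local helpers from s.replace/split)
-- s.replace(folder, '').split("_"): sep "_" ≠ "" so Python's split never raises (split? is some)
def pvParts (folder s : String) : List String :=
  (PySem.Str.split? (PySem.Str.replace s folder "") "_").getD []

def pvDev (folder s : String) : String := PySem.List.pyGetD (pvParts folder s) 0 ""
def pvApp (folder s : String) : String := PySem.List.pyGetD (pvParts folder s) 1 ""
def pvAct (folder s : String) : String := PySem.List.pyGetD (pvParts folder s) 2 ""
def pvIsBle (folder s : String) : Bool :=
  PySem.Str.lower (PySem.List.pyGetD (pvParts folder s) 3 "") == "ble"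

-- ===== PORT A =====
-- the three nested "if key not in dict: dict[key] = …" steps plus the append, one level each
def pvStep3 (folder : String) (da : PySem.Dict String (List String)) (s : String) :
    PySem.Dict String (List String) :=
  let action := pvAct folder s
  let da1 := if da.contains action then da else da.insert action []
  da1.insert action (da1.getD action [] ++ [s])

def pvStep2 (folder : String) (dd : PySem.Dict String (PySem.Dict String (List String))) (s : String) :
    PySem.Dict String (PySem.Dict String (List String)) :=
  let app := pvApp folder s
  let dd1 := if dd.contains app then dd else dd.insert app PySem.Dict.empty
  dd1.insert app (pvStep3 folder (dd1.getD app PySem.Dict.empty) s)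

def pvStep1 (folder : String)
    (h : PySem.Dict String (PySem.Dict String (PySem.Dict String (List String)))) (s : String) :
    PySem.Dict String (PySem.Dict String (PySem.Dict String (List String))) :=
  let device := pvDev folder s
  let h1 := if h.contains device then h else h.insert device PySem.Dict.empty
  h1.insert device (pvStep2 folder (h1.getD device PySem.Dict.empty) s)

-- if is_ble(s): sources_ble.append(s) else: sources_classic.append(s)
def pvEmit (folder : String) (acc : List String × List String) (s : String) :
    List String × List String :=
  if pvIsBle folder s then (acc.1, acc.2 ++ [s]) else (acc.1 ++ [s], acc.2)

def split_classic_ble (sources_files : List String) (folder : String) : List String × List String :=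
  let h := sources_files.foldl (pvStep1 folder) PySem.Dict.empty
  h.keys.foldl (fun acc device =>
    (h.getD device PySem.Dict.empty).keys.foldl (fun acc app =>
      ((h.getD device PySem.Dict.empty).getD app PySem.Dict.empty).keys.foldl (fun acc action =>
        (PySem.List.sorted
          (((h.getD device PySem.Dict.empty).getD app PySem.Dict.empty).getD action [])
          (fun x => x) false).foldl (pvEmit folder) acc) acc) acc) ([], [])

-- ===== PORT B =====
def pvOrdered (sources_files : List String) (folder : String) : List String :=
  (PySem.List.dedup (sources_files.map (pvDev folder))).flatMap (fun d =>
    let dfiles := sources_files.filter (fun s => pvDev folder s == d)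
    (PySem.List.dedup (dfiles.map (pvApp folder))).flatMap (fun a =>
      let afiles := dfiles.filter (fun s => pvApp folder s == a)
      (PySem.List.dedup (afiles.map (pvAct folder))).flatMap (fun t =>
        PySem.List.sorted (afiles.filter (fun s => pvAct folder s == t)) (fun x => x) false)))

def split_classic_ble_alt (sources_files : List String) (folder : String) :
    List String × List String :=
  let ordered := pvOrdered sources_files folder
  (ordered.filter (fun s => !(pvIsBle folder s)), ordered.filter (fun s => pvIsBle folder s))

-- ===== PRECONDITION & SPEC =====
-- Pre_ excludes exactly the inputs where the Python A raises IndexError: some file whose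
-- name (after removing folder) has fewer than 4 "_"-separated parts.
def Pre_split_classic_ble (sources_files : List String) (folder : String) : Prop :=
  ∀ s ∈ sources_files, 4 ≤ (pvParts folder s).length
instance (sources_files : List String) (folder : String) : Decidable (Pre_split_classic_ble sources_files folder) := by unfold Pre_split_classic_ble; infer_instance

def pvWitness_split_classic_ble : List String × String :=
  (["data/dev_app_act_ble_1.csv", "data/dev_app_act_wifi_2.csv"], "data/")

def Spec_split_classic_ble (sources_files : List String) (folder : String) (out : List String × List String) : Prop := out = split_classic_ble_alt sources_files folder
instance (sources_files : List String) (folder : String) (out : List String × List String) : Decidable (Spec_split_classic_ble sources_files folder out) := by unfold Spec_split_classic_ble; infer_instance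

-- ===== CLAIM (what is proved, stated in full; the proofs are below) =====
def Claim_equal_split_classic_ble : Prop := ∀ (sources_files : List String) (folder : String), Dom_split_classic_ble sources_files folder → Pre_split_classic_ble sources_files folder → Spec_split_classic_ble sources_files folder (split_classic_ble sources_files folder)

-- ===== LEMMAS AND PROOFS =====

-- canonical form of the grouped dicts, innermost first
def pvC3 (folder : String) (m : List String) : PySem.Dict String (List String) :=
  PySem.Dict.mk ((PySem.List.dedup (m.map (pvAct folder))).map
    (fun t => (t, m.filter (fun s => pvAct folder s == t))))

def pvC2 (folder : String) (m : List String) :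
    PySem.Dict String (PySem.Dict String (List String)) :=
  PySem.Dict.mk ((PySem.List.dedup (m.map (pvApp folder))).map
    (fun a => (a, pvC3 folder (m.filter (fun s => pvApp folder s == a)))))

def pvC1 (folder : String) (l : List String) :
    PySem.Dict String (PySem.Dict String (PySem.Dict String (List String))) :=
  PySem.Dict.mk ((PySem.List.dedup (l.map (pvDev folder))).map
    (fun d => (d, pvC2 folder (l.filter (fun s => pvDev folder s == d)))))

lemma keys_mk_map {ν : Type} (ks : List String) (g : String → ν) :
    (PySem.Dict.mk (ks.map (fun k => (k, g k)))).keys = ks := by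
  simp only [PySem.Dict.keys_mk, List.map_map]
  exact (List.map_congr_left fun a _ => rfl).trans (List.map_id _)

lemma getD_mk_map {ν : Type} (ks : List String) (g : String → ν) (d0 : ν)
    (hnd : ks.Nodup) {k : String} (hk : k ∈ ks) :
    (PySem.Dict.mk (ks.map (fun k => (k, g k)))).getD k d0 = g k := by
  refine PySem.Dict.getD_of_mem_items _ ?_ ?_ d0
  · exact List.mem_map.mpr ⟨k, hk, rfl⟩
  · rw [keys_mk_map]; exact hnd

-- the generic "group into an insertion-ordered dict" loop, characterised
lemma foldl_gstep {ν : Type} (key : String → String) (e : ν) (upd : ν → String → ν)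
    (f : PySem.Dict String ν → String → PySem.Dict String ν)
    (hf : ∀ h x, f h x =
      (if h.contains (key x) then h else h.insert (key x) e).insert (key x)
        (upd ((if h.contains (key x) then h else h.insert (key x) e).getD (key x) e) x))
    (l : List String) :
    l.foldl f PySem.Dict.empty =
      PySem.Dict.mk ((PySem.List.dedup (l.map key)).map
        (fun k => (k, (l.filter (fun x => key x == k)).foldl upd e))) := by
  induction l using List.reverseRecOn with
  | nil => rfl
  | append_singleton l x ih =>
    rw [List.foldl_append, List.foldl_cons, List.foldl_nil, ih, hf]
    have hk : (PySem.Dict.mk ((PySem.List.dedup (l.map key)).map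
        (fun k => (k, (l.filter (fun x => key x == k)).foldl upd e)))).keys
        = PySem.List.dedup (l.map key) := keys_mk_map _ _
    by_cases hmem : key x ∈ PySem.List.dedup (l.map key)
    · have hc : (PySem.Dict.mk ((PySem.List.dedup (l.map key)).map
          (fun k => (k, (l.filter (fun x => key x == k)).foldl upd e)))).contains (key x) = true := by
        rw [PySem.Dict.contains_eq_decide_mem_keys, hk]; simpa using hmem
      rw [hc]
      simp only [if_true]
      rw [getD_mk_map _ _ _ (PySem.List.nodup_dedup _) hmem]
      apply PySem.Dict.ext
      rw [PySem.Dict.items_insert_of_contains _ _ hc]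
      have hded : PySem.List.dedup ((l ++ [x]).map key) = PySem.List.dedup (l.map key) := by
        simp only [List.map_append, List.map_cons, List.map_nil, PySem.List.dedup_eq_ofList]
        rw [PySem.Set.ofList_append_singleton, PySem.Set.add_of_mem]
        rwa [PySem.List.dedup_eq_ofList] at hmem
      rw [hded]
      simp only [List.map_map]
      apply List.map_congr_left
      intro k hkmem
      simp only [Function.comp]
      by_cases hkx : k = key x
      · subst hkx
        simp [List.filter_append, List.foldl_append]
      · have : (k == key x) = false := by simpa using hkx
        rw [this]
        simp only [if_false, Bool.false_eq_true]
        congr 1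
        rw [List.filter_append]
        simp only [List.filter_cons, List.filter_nil]
        have : (key x == k) = false := by simpa using fun h => hkx h.symm
        rw [this]
        simp
    · have hc : (PySem.Dict.mk ((PySem.List.dedup (l.map key)).map
          (fun k => (k, (l.filter (fun x => key x == k)).foldl upd e)))).contains (key x) = false := by
        rw [PySem.Dict.contains_eq_decide_mem_keys, hk]; simpa using hmem
      rw [hc]
      simp only [Bool.false_eq_true, if_false]
      rw [PySem.Dict.getD_insert_self, PySem.Dict.insert_insert_self]
      apply PySem.Dict.ext
      have hcnew : (PySem.Dict.mk ((PySem.List.dedup (l.map key)).map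
          (fun k => (k, (l.filter (fun x => key x == k)).foldl upd e)))).contains (key x) = false := hc
      rw [PySem.Dict.items_insert_of_not_contains _ _ hcnew]
      have hded : PySem.List.dedup ((l ++ [x]).map key)
          = PySem.List.dedup (l.map key) ++ [key x] := by
        simp only [List.map_append, List.map_cons, List.map_nil, PySem.List.dedup_eq_ofList]
        rw [PySem.Set.ofList_append_singleton, PySem.Set.add_of_not_mem]
        rwa [PySem.List.dedup_eq_ofList] at hmem
      rw [hded, List.map_append]
      have hnotl : key x ∉ l.map key := by
        intro h; exact hmem (by rwa [PySem.List.dedup_eq_ofList, PySem.Set.mem_ofList])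
      congr 1
      · apply List.map_congr_left
        intro k hkmem
        have hkx : k ≠ key x := fun h => hmem (h ▸ hkmem)
        congr 1
        rw [List.filter_append]
        simp only [List.filter_cons, List.filter_nil]
        have : (key x == k) = false := by simpa using fun h => hkx h.symm
        rw [this]
        simp
      · simp only [List.map_cons, List.map_nil]
        have hfl : l.filter (fun y => key y == key x) = [] := by
          rw [List.filter_eq_nil_iff]
          intro a ha h
          exact hnotl (List.mem_map.mpr ⟨a, ha, by simpa using h⟩)
        rw [List.filter_append, hfl]
        simp

lemma build3_eq (folder : String) (m : List String) :
    m.foldl (pvStep3 folder) PySem.Dict.empty = pvC3 folder m := by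
  rw [foldl_gstep (pvAct folder) [] (fun lst s => lst ++ [s]) (pvStep3 folder)
    (fun h x => rfl)]
  unfold pvC3
  congr 1
  apply List.map_congr_left
  intro t _
  congr 1
  exact PySem.List.foldl_append_singleton _ []

lemma build2_eq (folder : String) (m : List String) :
    m.foldl (pvStep2 folder) PySem.Dict.empty = pvC2 folder m := by
  rw [foldl_gstep (pvApp folder) PySem.Dict.empty (pvStep3 folder) (pvStep2 folder)
    (fun h x => rfl)]
  unfold pvC2
  congr 1
  apply List.map_congr_left
  intro a _
  congr 1
  exact build3_eq folder _

lemma build1_eq (folder : String) (l : List String) :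
    l.foldl (pvStep1 folder) PySem.Dict.empty = pvC1 folder l := by
  rw [foldl_gstep (pvDev folder) PySem.Dict.empty (pvStep2 folder) (pvStep1 folder)
    (fun h x => rfl)]
  unfold pvC1
  congr 1
  apply List.map_congr_left
  intro d _
  congr 1
  exact build2_eq folder _

-- a nested fold over a decomposition is the fold over the flattened list
lemma foldl_foldl_flatMap {α β : Type} (K : List α) (sub : α → List String)
    (f : β → String → β) (acc : β) :
    K.foldl (fun a k => (sub k).foldl f a) acc = (K.flatMap sub).foldl f acc := by
  induction K generalizing acc with
  | nil => rfl
  | cons k K ih => simp only [List.foldl_cons, List.flatMap_cons, List.foldl_append, ih]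

-- the if/append loop is a pair of filters
lemma emit_foldl (folder : String) (L c b : List String) :
    L.foldl (pvEmit folder) (c, b) =
      (c ++ L.filter (fun s => !(pvIsBle folder s)), b ++ L.filter (fun s => pvIsBle folder s)) := by
  induction L generalizing c b with
  | nil => simp
  | cons s L ih =>
    simp only [List.foldl_cons, List.filter_cons, pvEmit]
    by_cases h : pvIsBle folder s
    · simp [h, ih]
    · simp [h, ih]

-- flattening the traversal of the canonical dicts, innermost first
lemma keys_pvC3 (folder : String) (m : List String) :
    (pvC3 folder m).keys = PySem.List.dedup (m.map (pvAct folder)) := by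
  unfold pvC3; exact keys_mk_map _ _

lemma getD_pvC3 (folder : String) (m : List String) {t : String}
    (ht : t ∈ PySem.List.dedup (m.map (pvAct folder))) :
    (pvC3 folder m).getD t [] = m.filter (fun s => pvAct folder s == t) := by
  unfold pvC3; exact getD_mk_map _ _ _ (PySem.List.nodup_dedup _) ht

lemma keys_pvC2 (folder : String) (m : List String) :
    (pvC2 folder m).keys = PySem.List.dedup (m.map (pvApp folder)) := by
  unfold pvC2; exact keys_mk_map _ _

lemma getD_pvC2 (folder : String) (m : List String) {a : String}
    (ha : a ∈ PySem.List.dedup (m.map (pvApp folder))) :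
    (pvC2 folder m).getD a PySem.Dict.empty = pvC3 folder (m.filter (fun s => pvApp folder s == a)) := by
  unfold pvC2; exact getD_mk_map _ _ _ (PySem.List.nodup_dedup _) ha

lemma keys_pvC1 (folder : String) (l : List String) :
    (pvC1 folder l).keys = PySem.List.dedup (l.map (pvDev folder)) := by
  unfold pvC1; exact keys_mk_map _ _

lemma getD_pvC1 (folder : String) (l : List String) {d : String}
    (hd : d ∈ PySem.List.dedup (l.map (pvDev folder))) :
    (pvC1 folder l).getD d PySem.Dict.empty = pvC2 folder (l.filter (fun s => pvDev folder s == d)) := by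
  unfold pvC1; exact getD_mk_map _ _ _ (PySem.List.nodup_dedup _) hd

lemma trav3_eq (folder : String) (m : List String) {β : Type} (f : β → String → β) (acc : β) :
    (pvC3 folder m).keys.foldl (fun acc t =>
        (PySem.List.sorted ((pvC3 folder m).getD t []) (fun x => x) false).foldl f acc) acc
    = ((PySem.List.dedup (m.map (pvAct folder))).flatMap (fun t =>
        PySem.List.sorted (m.filter (fun s => pvAct folder s == t)) (fun x => x) false)).foldl f acc := by
  rw [keys_pvC3]
  rw [PySem.List.foldl_congr_mem _ _ (fun acc t =>
      (PySem.List.sorted (m.filter (fun s => pvAct folder s == t)) (fun x => x) false).foldl f acc) _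
    (fun acc t ht => by rw [getD_pvC3 folder m ht])]
  exact foldl_foldl_flatMap _ _ f acc

lemma trav2_eq (folder : String) (m : List String) {β : Type} (f : β → String → β) (acc : β) :
    (pvC2 folder m).keys.foldl (fun acc a =>
        ((pvC2 folder m).getD a PySem.Dict.empty).keys.foldl (fun acc t =>
          (PySem.List.sorted (((pvC2 folder m).getD a PySem.Dict.empty).getD t [])
            (fun x => x) false).foldl f acc) acc) acc
    = ((PySem.List.dedup (m.map (pvApp folder))).flatMap (fun a =>
        (PySem.List.dedup ((m.filter (fun s => pvApp folder s == a)).map (pvAct folder))).flatMap (fun t =>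
          PySem.List.sorted ((m.filter (fun s => pvApp folder s == a)).filter
            (fun s => pvAct folder s == t)) (fun x => x) false))).foldl f acc := by
  rw [keys_pvC2]
  rw [PySem.List.foldl_congr_mem _ _ (fun acc a =>
      ((PySem.List.dedup ((m.filter (fun s => pvApp folder s == a)).map (pvAct folder))).flatMap (fun t =>
        PySem.List.sorted ((m.filter (fun s => pvApp folder s == a)).filter
          (fun s => pvAct folder s == t)) (fun x => x) false)).foldl f acc) _
    (fun acc a ha => by rw [getD_pvC2 folder m ha, trav3_eq])]
  exact foldl_foldl_flatMap _ _ f acc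

lemma trav1_eq (folder : String) (l : List String) {β : Type} (f : β → String → β) (acc : β) :
    (pvC1 folder l).keys.foldl (fun acc d =>
        ((pvC1 folder l).getD d PySem.Dict.empty).keys.foldl (fun acc a =>
          (((pvC1 folder l).getD d PySem.Dict.empty).getD a PySem.Dict.empty).keys.foldl (fun acc t =>
            (PySem.List.sorted ((((pvC1 folder l).getD d PySem.Dict.empty).getD a
              PySem.Dict.empty).getD t []) (fun x => x) false).foldl f acc) acc) acc) acc
    = (pvOrdered l folder).foldl f acc := by
  rw [keys_pvC1]
  rw [PySem.List.foldl_congr_mem _ _ (fun acc d =>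
      ((PySem.List.dedup ((l.filter (fun s => pvDev folder s == d)).map (pvApp folder))).flatMap (fun a =>
        (PySem.List.dedup (((l.filter (fun s => pvDev folder s == d)).filter
            (fun s => pvApp folder s == a)).map (pvAct folder))).flatMap (fun t =>
          PySem.List.sorted (((l.filter (fun s => pvDev folder s == d)).filter
            (fun s => pvApp folder s == a)).filter (fun s => pvAct folder s == t))
            (fun x => x) false))).foldl f acc) _
    (fun acc d hd => by rw [getD_pvC1 folder l hd, trav2_eq])]
  rw [foldl_foldl_flatMap _ _ f acc]
  rfl

-- ===== VERDICT (by name: the statement is the Claim_ definition above) =====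
theorem split_classic_ble_spec : Claim_equal_split_classic_ble := by
  intro l folder _ _
  unfold Spec_split_classic_ble split_classic_ble split_classic_ble_alt
  rw [build1_eq, trav1_eq, emit_foldl]
  simp
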